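-- pv_equiv track=rewrite | github.com/minkyeongk/CodingTest_Algorithm | 괄호 변환.py | is_bal
-- ===== SOURCE A (Python) =====
-- def is_bal(p):
--     cnt = 0
--     for i in range(len(p)):
--         if p[i] == '(':
--             cnt += 1
--         else:
--             cnt -= 1
--         if cnt == 0:        # 가장 작은 균형 문자열
--             return i
-- ===== SOURCE B (Python) =====
-- def is_bal(p):
--     sums = []
--     s = 0
--     for c in p:
--         s += 1 if c == '(' else -1
--         sums.append(s)
--     return sums.index(0) if 0 in sums else None
-- ===== Notes on version B (the rewrite author's own statement) =====
-- stated objective: alternative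
-- what changed: Replaces A's single fused loop (counter with early return at index i) by a build-then-search decomposition: first compute the full running-balance prefix-sum table, then find the first 0 in it with list.index.
import Mathlib
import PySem

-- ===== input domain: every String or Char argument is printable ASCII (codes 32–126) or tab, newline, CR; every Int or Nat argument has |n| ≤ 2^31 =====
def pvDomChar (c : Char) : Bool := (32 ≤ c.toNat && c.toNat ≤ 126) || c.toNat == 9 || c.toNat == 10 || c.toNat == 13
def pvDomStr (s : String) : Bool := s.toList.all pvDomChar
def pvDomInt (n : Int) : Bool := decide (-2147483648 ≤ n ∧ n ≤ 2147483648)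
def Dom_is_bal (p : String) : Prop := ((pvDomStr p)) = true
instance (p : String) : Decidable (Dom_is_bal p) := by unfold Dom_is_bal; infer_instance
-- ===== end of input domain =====

-- B replaces A's fused counter loop with early return by a build-then-search
-- decomposition: build the running-balance prefix-sum table, then find its first 0
-- with list.index (objective: alternative, same O(n) cost).

-- ===== PORT A =====
-- A: single loop keeping a counter, returning the index as soon as it hits 0.
def isBalLoop : List Char → Int → Int → Option Int
  | [], _, _ => none
  | c :: rest, cnt, i =>
    let cnt' := if c = '(' then cnt + 1 else cnt - 1
    if cnt' = 0 then some i else isBalLoop rest cnt' (i + 1)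

def is_bal (p : String) : Option Int := isBalLoop p.toList 0 0

-- ===== PORT B =====
-- B: build the list of running balances, then search it for the first 0.
def prefixSums : List Char → Int → List Int
  | [], _ => []
  | c :: rest, s =>
    let s' := s + (if c = '(' then 1 else -1)
    s' :: prefixSums rest s'

def is_bal_alt (p : String) : Option Int :=
  let sums := prefixSums p.toList 0
  if (0 : Int) ∈ sums then (PySem.List.index? sums 0).map Int.ofNat else none

-- ===== PRECONDITION & SPEC =====
def Spec_is_bal (p : String) (out : Option Int) : Prop := out = is_bal_alt p
instance (p : String) (out : Option Int) : Decidable (Spec_is_bal p out) := by unfold Spec_is_bal; infer_instance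

-- ===== CLAIM (what is proved, stated in full; the proofs are below) =====
def Claim_equal_is_bal : Prop := ∀ (p : String), Dom_is_bal p → Spec_is_bal p (is_bal p)

-- ===== LEMMAS AND PROOFS =====
theorem isBalLoop_eq_index (cs : List Char) : ∀ (cnt i : Int),
    isBalLoop cs cnt i
      = (PySem.List.index? (prefixSums cs cnt) 0).map (fun k => i + (k : Int)) := by
  induction cs with
  | nil => intro cnt i; simp [isBalLoop, prefixSums, PySem.List.index?]
  | cons c rest ih =>
    intro cnt i
    have hcnt : (if c = '(' then cnt + 1 else cnt - 1)
        = cnt + (if c = '(' then 1 else -1) := by split_ifs <;> ring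
    simp only [isBalLoop, prefixSums, hcnt]
    generalize cnt + (if c = '(' then (1 : Int) else -1) = s'
    by_cases h0 : s' = 0
    · subst h0
      rw [PySem.List.index?_cons_self]
      simp
    · rw [if_neg h0, PySem.List.index?_cons_of_ne _ h0, ih s' (i + 1)]
      cases PySem.List.index? (prefixSums rest s') 0 with
      | none => simp
      | some k => simp; ring

-- ===== VERDICT (by name: the statement is the Claim_ definition above) =====
theorem is_bal_spec : Claim_equal_is_bal := by
  intro p _
  unfold Spec_is_bal is_bal is_bal_alt
  rw [isBalLoop_eq_index]
  by_cases hm : (0 : Int) ∈ prefixSums p.toList 0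
  · rw [if_pos hm]
    cases hk : PySem.List.index? (prefixSums p.toList 0) 0 with
    | none => rw [PySem.List.index?_eq_none_iff] at hk; exact absurd hm hk
    | some k => simp
  · rw [if_neg hm]
    have h : PySem.List.index? (prefixSums p.toList 0) 0 = none := by
      rw [PySem.List.index?_eq_none_iff]; exact hm
    rw [h]; rfl
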